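-- pv_equiv track=rewrite | github.com/rtsoliday/medm | tests/testADL_SaveFiles.py | strip_polyline_outline_fill
-- ===== SOURCE A (Python) =====
-- def _strip_polyline_basic_attribute(block_lines: list[str]) -> list[str]:
--   """Remove outline fill lines from polyline basic attribute blocks."""
--   result: list[str] = []
--   inside_basic = False
--   depth = 0
--
--   for line in block_lines:
--     stripped = line.strip()
--     if not inside_basic and stripped.startswith('"basic attribute"'):
--       inside_basic = True
--       depth = line.count("{") - line.count("}")
--       result.append(line)
--       if depth <= 0:
--         inside_basic = False
--       continue
--
--     if inside_basic:
--       if stripped != 'fill="outline"':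
--         result.append(line)
--       depth += line.count("{") - line.count("}")
--       if depth <= 0:
--         inside_basic = False
--       continue
--
--     result.append(line)
--
--   return result
--
-- def strip_polyline_outline_fill(lines: list[str]) -> list[str]:
--   """Remove fill="outline" lines from polyline widgets."""
--   result: list[str] = []
--   i = 0
--   while i < len(lines):
--     line = lines[i]
--     stripped = line.strip()
--     if stripped.startswith("polyline"):
--       block: list[str] = []
--       depth = 0
--       while i < len(lines):
--         block_line = lines[i]
--         block.append(block_line)
--         depth += block_line.count("{") - block_line.count("}")
--         i += 1
--         if depth <= 0:
--           break
--       result.extend(_strip_polyline_basic_attribute(block))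
--       continue
--
--     result.append(line)
--     i += 1
--
--   return result
-- ===== SOURCE B (Python) =====
-- def strip_polyline_outline_fill(lines: list[str]) -> list[str]:
--   """Remove fill="outline" lines from polyline widgets, in one fused pass."""
--   out: list[str] = []
--   in_poly = False
--   in_basic = False
--   poly_depth = 0
--   basic_depth = 0
--   for line in lines:
--     stripped = line.strip()
--     delta = line.count("{") - line.count("}")
--     if not in_poly:
--       out.append(line)
--       if stripped.startswith("polyline") and delta > 0:
--         in_poly = True
--         poly_depth = delta
--       continue
--     poly_depth += delta
--     if not in_basic and stripped.startswith('"basic attribute"'):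
--       out.append(line)
--       if delta > 0:
--         in_basic = True
--         basic_depth = delta
--     elif in_basic:
--       if stripped != 'fill="outline"':
--         out.append(line)
--       basic_depth += delta
--       if basic_depth <= 0:
--         in_basic = False
--         basic_depth = 0
--     else:
--       out.append(line)
--     if poly_depth <= 0:
--       in_poly = False
--       in_basic = False
--       poly_depth = 0
--       basic_depth = 0
--   return out
-- ===== Notes on version B (the rewrite author's own statement) =====
-- stated objective: simpler
-- what changed: Replaced A's two-phase structure (outer scan that extracts each polyline block into a list, then a separate helper pass filtering that block) with a single fused linear pass over the lines carrying in_polyline/in_basic flags and two depth counters, so no intermediate block lists are built.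
import Mathlib
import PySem

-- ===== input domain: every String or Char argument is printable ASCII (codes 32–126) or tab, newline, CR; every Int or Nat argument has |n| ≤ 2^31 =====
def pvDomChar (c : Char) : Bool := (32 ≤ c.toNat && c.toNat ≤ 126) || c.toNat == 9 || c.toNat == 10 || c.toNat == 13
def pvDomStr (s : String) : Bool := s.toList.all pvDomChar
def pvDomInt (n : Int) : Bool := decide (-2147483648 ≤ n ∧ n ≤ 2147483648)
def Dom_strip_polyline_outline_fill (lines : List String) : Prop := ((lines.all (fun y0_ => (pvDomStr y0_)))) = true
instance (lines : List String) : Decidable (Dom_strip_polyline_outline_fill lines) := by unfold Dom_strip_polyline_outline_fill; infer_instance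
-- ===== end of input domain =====

-- B fuses A's extract-block-then-helper structure into one linear pass with explicit
-- in_polyline/in_basic state flags and depth counters (objective: simpler decomposition).


-- ===== PORT A =====
-- line.count("{") - line.count("}")  (shared by both ports, as in both Pythons)
def pvCnt (l : String) : Int := (PySem.Str.count l "{" : Int) - (PySem.Str.count l "}" : Int)

-- A's inner while loop: collect lines into `block` until depth <= 0; returns (block, remaining lines)
def pvTakeBlock : List String → Int → List String × List String
  | [], _ => ([], [])
  | l :: rest, depth =>
    let d := depth + pvCnt l
    if d ≤ 0 then ([l], rest)
    else
      let p := pvTakeBlock rest d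
      (l :: p.1, p.2)

-- needed by pvStripGoA's decreasing_by
theorem pvTakeBlock_snd_le : ∀ (xs : List String) (d : Int), (pvTakeBlock xs d).2.length ≤ xs.length := by
  intro xs
  induction xs with
  | nil => intro d; simp [pvTakeBlock]
  | cons l rest ih =>
    intro d
    simp only [pvTakeBlock]
    split
    · simp
    · exact le_trans (ih _) (by simp)

theorem pvTakeBlock_snd_lt (l : String) (rest : List String) (d : Int) :
    (pvTakeBlock (l :: rest) d).2.length < (l :: rest).length := by
  simp only [pvTakeBlock]
  split
  · simp
  · exact lt_of_le_of_lt (pvTakeBlock_snd_le rest _) (by simp)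

-- A's helper _strip_polyline_basic_attribute, state (inside_basic, depth)
def pvStripBasicGo : List String → Bool → Int → List String
  | [], _, _ => []
  | l :: rest, insideBasic, depth =>
    let s := PySem.Str.strip l
    if insideBasic = false ∧ PySem.Str.startswith s "\"basic attribute\"" = true then
      let d := pvCnt l
      l :: pvStripBasicGo rest (decide (¬ d ≤ 0)) d
    else if insideBasic = true then
      let d' := depth + pvCnt l
      (if s ≠ "fill=\"outline\"" then [l] else []) ++ pvStripBasicGo rest (decide (¬ d' ≤ 0)) d'
    else
      l :: pvStripBasicGo rest insideBasic depth

-- A's outer while loop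
def pvStripGoA : List String → List String
  | [] => []
  | l :: rest =>
    if PySem.Str.startswith (PySem.Str.strip l) "polyline" = true then
      let p := pvTakeBlock (l :: rest) 0
      pvStripBasicGo p.1 false 0 ++ pvStripGoA p.2
    else l :: pvStripGoA rest
termination_by xs => xs.length
decreasing_by
  · exact pvTakeBlock_snd_lt l rest 0
  · simp

def strip_polyline_outline_fill (lines : List String) : List String := pvStripGoA lines

-- ===== PORT B =====
-- B's single fused loop, state (in_poly, poly_depth, in_basic, basic_depth)
def pvGoB : List String → Bool → Int → Bool → Int → List String
  | [], _, _, _, _ => []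
  | l :: rest, inPoly, pd, inBasic, bd =>
    let s := PySem.Str.strip l
    let d := pvCnt l
    if inPoly = false then
      l :: (if PySem.Str.startswith s "polyline" = true ∧ 0 < d then pvGoB rest true d inBasic bd
            else pvGoB rest false pd inBasic bd)
    else
      let pd' := pd + d
      if inBasic = false ∧ PySem.Str.startswith s "\"basic attribute\"" = true then
        l :: (if pd' ≤ 0 then pvGoB rest false 0 false 0
              else if 0 < d then pvGoB rest true pd' true d
              else pvGoB rest true pd' inBasic bd)
      else if inBasic = true then
        let bd' := bd + d
        (if s ≠ "fill=\"outline\"" then [l] else []) ++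
          (if pd' ≤ 0 then pvGoB rest false 0 false 0
           else if bd' ≤ 0 then pvGoB rest true pd' false 0
           else pvGoB rest true pd' true bd')
      else
        l :: (if pd' ≤ 0 then pvGoB rest false 0 false 0 else pvGoB rest true pd' inBasic bd)

def strip_polyline_outline_fill_alt (lines : List String) : List String :=
  pvGoB lines false 0 false 0

-- ===== PRECONDITION & SPEC =====
def Spec_strip_polyline_outline_fill (lines : List String) (out : List String) : Prop := out = strip_polyline_outline_fill_alt lines
instance (lines : List String) (out : List String) : Decidable (Spec_strip_polyline_outline_fill lines out) := by unfold Spec_strip_polyline_outline_fill; infer_instance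

-- ===== CLAIM (what is proved, stated in full; the proofs are below) =====
def Claim_equal_strip_polyline_outline_fill : Prop := ∀ (lines : List String), Dom_strip_polyline_outline_fill lines → Spec_strip_polyline_outline_fill lines (strip_polyline_outline_fill lines)

-- ===== LEMMAS AND PROOFS =====

-- a line whose strip starts with "polyline" cannot also start with '"basic attribute"'
theorem pv_poly_not_basic (s : String) (h : PySem.Str.startswith s "polyline" = true) :
    PySem.Str.startswith s "\"basic attribute\"" = false := by
  by_contra hb
  rw [Bool.not_eq_false] at hb
  rw [PySem.Str.startswith_eq, PySem.Chars.startswith_iff] at h hb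
  obtain ⟨t, ht⟩ := h
  obtain ⟨u, hu⟩ := hb
  rw [← ht] at hu
  have h1 : (("\"basic attribute\"".toList ++ u).head? : Option Char) = some '"' := by
    have : "\"basic attribute\"".toList = '"' :: "basic attribute\"".toList := rfl
    rw [this]; rfl
  have h2 : (("polyline".toList ++ t).head? : Option Char) = some 'p' := by
    have : "polyline".toList = 'p' :: "olyline".toList := rfl
    rw [this]; rfl
  rw [hu, h2] at h1
  simp at h1

-- KEY: inside a polyline block B's fused loop = A's helper on the block ++ B restarted after it
theorem pv_key : ∀ (xs : List String) (d : Int) (ib : Bool) (bd hd : Int),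
    (ib = true → hd = bd) →
    pvGoB xs true d ib bd =
      pvStripBasicGo (pvTakeBlock xs d).1 ib hd ++ pvGoB (pvTakeBlock xs d).2 false 0 false 0 := by
  intro xs
  induction xs with
  | nil => intro d ib bd hd _; simp [pvGoB, pvTakeBlock, pvStripBasicGo]
  | cons l rest ih =>
    intro d ib bd hd hib
    simp only [pvGoB, pvTakeBlock]
    cases ib with
    | true =>
      have hbd : hd = bd := hib rfl
      subst hbd
      by_cases hpd : d + pvCnt l ≤ 0
      · simp [hpd, pvStripBasicGo]
      · by_cases hb2 : hd + pvCnt l ≤ 0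
        · simp [hpd, hb2, pvStripBasicGo,
            ih (d + pvCnt l) false 0 (hd + pvCnt l) (by simp)]
        · simp [hpd, hb2, pvStripBasicGo,
            ih (d + pvCnt l) true (hd + pvCnt l) (hd + pvCnt l) (fun _ => rfl)]
    | false =>
      by_cases hbs : PySem.Str.startswith (PySem.Str.strip l) "\"basic attribute\"" = true
      · simp at hbs
        by_cases hpd : d + pvCnt l ≤ 0
        · simp [hpd, hbs, pvStripBasicGo]
        · by_cases hd0 : 0 < pvCnt l
          · have hn : ¬ pvCnt l ≤ 0 := by omega
            simp [hpd, hbs, hd0, hn, pvStripBasicGo,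
              ih (d + pvCnt l) true (pvCnt l) (pvCnt l) (fun _ => rfl)]
          · have hn : pvCnt l ≤ 0 := by omega
            simp [hpd, hbs, hd0, hn, pvStripBasicGo,
              ih (d + pvCnt l) false bd (pvCnt l) (by simp)]
      · simp at hbs
        by_cases hpd : d + pvCnt l ≤ 0
        · simp [hpd, hbs, pvStripBasicGo]
        · simp [hpd, hbs, pvStripBasicGo, ih (d + pvCnt l) false bd hd (by simp)]

-- MAIN: A's outer loop = B's fused loop from the neutral state
theorem pv_main : ∀ (n : Nat) (xs : List String), xs.length ≤ n →
    pvStripGoA xs = pvGoB xs false 0 false 0 := by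
  intro n
  induction n with
  | zero =>
    intro xs h
    have hx : xs = [] := List.length_eq_zero_iff.mp (Nat.le_zero.mp h)
    subst hx; simp [pvStripGoA, pvGoB]
  | succ n ih =>
    intro xs h
    match xs with
    | [] => simp [pvStripGoA, pvGoB]
    | l :: rest =>
      by_cases hp : PySem.Str.startswith (PySem.Str.strip l) "polyline" = true
      · have hnb := pv_poly_not_basic _ hp
        simp at hp hnb
        by_cases hd0 : 0 < pvCnt l
        · have h1 : ¬ pvCnt l ≤ 0 := by omega
          have hlen : (pvTakeBlock rest (pvCnt l)).2.length ≤ n := by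
            have := pvTakeBlock_snd_le rest (pvCnt l)
            simp at h; omega
          simp [pvStripGoA, pvGoB, pvTakeBlock, hp, hnb, hd0, h1, pvStripBasicGo,
            pv_key rest (pvCnt l) false 0 0 (by simp), ih _ hlen]
        · have h1 : pvCnt l ≤ 0 := by omega
          have hlen : rest.length ≤ n := by simp at h; omega
          simp [pvStripGoA, pvGoB, pvTakeBlock, hp, hnb, hd0, h1, pvStripBasicGo,
            ih rest hlen]
      · simp at hp
        have hlen : rest.length ≤ n := by simp at h; omega
        simp [pvStripGoA, pvGoB, hp, ih rest hlen]

-- ===== VERDICT (by name: the statement is the Claim_ definition above) =====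
theorem strip_polyline_outline_fill_spec : Claim_equal_strip_polyline_outline_fill := by
  intro lines _
  unfold Spec_strip_polyline_outline_fill strip_polyline_outline_fill strip_polyline_outline_fill_alt
  exact pv_main lines.length lines le_rfl
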